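-- pv_equiv track=rewrite | github.com/Certora/AIComposer | composer/spec/source/prover.py | _merge_rule_skips
-- ===== SOURCE A (Python) =====
-- DELETE_SKIP = "__delete_skip"
--
-- def _merge_rule_skips(left: dict[str, str], right: dict[str, str]) -> dict[str, str]:
--     to_ret = left.copy()
--     for (k,v) in right.items():
--         if v == DELETE_SKIP:
--             if k in to_ret:
--                 del to_ret[k]
--             continue
--         to_ret[k] = v
--     return to_ret
-- ===== SOURCE B (Python) =====
-- DELETE_SKIP = "__delete_skip"
--
-- def _merge_rule_skips(left: dict[str, str], right: dict[str, str]) -> dict[str, str]: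
--     # Per-key join: decide each left key's fate by a lookup in right,
--     # then append right's genuinely new entries. No copy/mutate/delete.
--     result = {}
--     for k, v in left.items():
--         if k in right:
--             rv = right[k]
--             if rv != DELETE_SKIP:
--                 result[k] = rv
--         else:
--             result[k] = v
--     for k, v in right.items():
--         if k not in left and v != DELETE_SKIP:
--             result[k] = v
--     return result
-- ===== Notes on version B (the rewrite author's own statement) =====
-- stated objective: alternative
-- what changed: A mutates a copy of left while folding over right (conditional delete/overwrite per right entry); B never copies or mutates: it builds a fresh dict by a per-key join, iterating left and deciding each key by a lookup in right, then appending right's new non-delete entries.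
import Mathlib
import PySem

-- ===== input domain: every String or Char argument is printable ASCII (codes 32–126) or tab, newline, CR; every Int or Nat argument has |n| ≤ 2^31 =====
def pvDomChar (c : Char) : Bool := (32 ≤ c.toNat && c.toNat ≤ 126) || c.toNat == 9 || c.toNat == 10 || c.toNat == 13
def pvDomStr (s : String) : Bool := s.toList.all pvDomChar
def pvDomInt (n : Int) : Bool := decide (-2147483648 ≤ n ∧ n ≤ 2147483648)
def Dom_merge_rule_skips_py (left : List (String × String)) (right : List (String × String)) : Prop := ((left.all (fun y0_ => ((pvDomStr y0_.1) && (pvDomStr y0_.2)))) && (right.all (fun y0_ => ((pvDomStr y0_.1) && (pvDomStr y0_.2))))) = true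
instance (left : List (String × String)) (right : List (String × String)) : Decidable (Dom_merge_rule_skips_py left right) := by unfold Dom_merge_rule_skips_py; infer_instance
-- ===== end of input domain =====

-- B never copies or mutates `left`: it builds a fresh dict by a per-key join (each left key decided by a
-- lookup in right, then right's new non-delete entries appended) instead of A's mutate-a-copy fold over right.

-- ===== PORT A =====
-- to_ret = left.copy(); for (k,v) in right.items(): if v == DELETE_SKIP: (if k in to_ret: del to_ret[k]); continue; to_ret[k] = v
def merge_rule_skips_py (left : List (String × String)) (right : List (String × String)) : List (String × String) :=
  (right.foldl
    (fun to_ret p =>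
      if p.2 == "__delete_skip" then
        (if to_ret.contains p.1 then to_ret.erase p.1 else to_ret)
      else
        to_ret.insert p.1 p.2)
    (PySem.Dict.mk left)).items

-- ===== PORT B =====
-- result = {}; for k,v in left.items(): if k in right: (rv = right[k]; if rv != DELETE_SKIP: result[k] = rv)
--             else: result[k] = v
-- for k,v in right.items(): if k not in left and v != DELETE_SKIP: result[k] = v
-- (the getD default "" is unreachable: the lookup is guarded by `contains`, exactly like Python's `k in right`)
def merge_rule_skips_py_alt (left : List (String × String)) (right : List (String × String)) : List (String × String) :=
  (right.foldl
    (fun res p =>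
      if !((PySem.Dict.mk left).contains p.1) && !(p.2 == "__delete_skip") then
        res.insert p.1 p.2
      else res)
    (left.foldl
      (fun res p =>
        if (PySem.Dict.mk right).contains p.1 then
          (if ((PySem.Dict.mk right).getD p.1 "") == "__delete_skip" then res
           else res.insert p.1 ((PySem.Dict.mk right).getD p.1 ""))
        else
          res.insert p.1 p.2)
      PySem.Dict.empty)).items

-- ===== PRECONDITION & SPEC =====
-- The association lists stand for Python dicts, whose keys are unique: a list with duplicate keys
-- corresponds to no dict input of A, so Pre_ requires both key lists to be distinct.
def Pre_merge_rule_skips_py (left : List (String × String)) (right : List (String × String)) : Prop :=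
  (left.map Prod.fst).Nodup ∧ (right.map Prod.fst).Nodup
instance (left : List (String × String)) (right : List (String × String)) : Decidable (Pre_merge_rule_skips_py left right) := by unfold Pre_merge_rule_skips_py; infer_instance

def pvWitness_merge_rule_skips_py : (List (String × String)) × (List (String × String)) :=
  ([("a", "1"), ("b", "2")], [("a", "__delete_skip"), ("c", "3")])

def Spec_merge_rule_skips_py (left : List (String × String)) (right : List (String × String)) (out : List (String × String)) : Prop := out = merge_rule_skips_py_alt left right
instance (left : List (String × String)) (right : List (String × String)) (out : List (String × String)) : Decidable (Spec_merge_rule_skips_py left right out) := by unfold Spec_merge_rule_skips_py; infer_instance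

-- ===== CLAIM (what is proved, stated in full; the proofs are below) =====
def Claim_equal_merge_rule_skips_py : Prop := ∀ (left : List (String × String)) (right : List (String × String)), Dom_merge_rule_skips_py left right → Pre_merge_rule_skips_py left right → Spec_merge_rule_skips_py left right (merge_rule_skips_py left right)

-- ===== LEMMAS AND PROOFS =====

-- the joint normal form both ports are reduced to:
--   f1 right: what becomes of a left entry (keep / overwrite / drop), decided by lookup in right
--   f2 ld:    which right entries are appended as new (key not in left, not a delete marker)
def f1 (right : List (String × String)) (p : String × String) : Option (String × String) :=
  match (PySem.Dict.mk right).get? p.1 with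
  | none => some p
  | some rv => if rv == "__delete_skip" then none else some (p.1, rv)

def f2 (ld : PySem.Dict String String) (p : String × String) : Option (String × String) :=
  if !(ld.contains p.1) && !(p.2 == "__delete_skip") then some p else none

theorem f1_key (right : List (String × String)) (p q : String × String)
    (h : f1 right p = some q) : q.1 = p.1 := by
  unfold f1 at h
  cases hg : (PySem.Dict.mk right).get? p.1 with
  | none => rw [hg] at h; injection h with h; rw [← h]
  | some rv =>
    rw [hg] at h
    by_cases hd : (rv == "__delete_skip") = true
    · simp [hd] at h
    · simp only [hd, Bool.false_eq_true, if_neg, not_false_iff] at h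
      injection h with h; rw [← h]

theorem f2_key (ld : PySem.Dict String String) (p q : String × String)
    (h : f2 ld p = some q) : q.1 = p.1 := by
  unfold f2 at h
  split at h
  · injection h with h; rw [← h]
  · exact absurd h (by simp)

-- the keys kept by a key-preserving filterMap form a sublist of the original keys
theorem filterMap_fst_sublist (f : String × String → Option (String × String))
    (hf : ∀ p q, f p = some q → q.1 = p.1) (l : List (String × String)) :
    ((l.filterMap f).map Prod.fst).Sublist (l.map Prod.fst) := by
  induction l with
  | nil => simp
  | cons a l ih =>
    cases hfa : f a with
    | none => simpa [List.filterMap_cons, hfa] using ih.trans (List.sublist_cons_self _ _)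
    | some q =>
      simpa [List.filterMap_cons, hfa, hf a q hfa] using List.Sublist.cons₂ a.1 ih

-- a fold of conditional inserts over fresh distinct keys appends its filterMap
theorem foldl_optInsert (f : String × String → Option (String × String))
    (l : List (String × String)) :
    ∀ res : PySem.Dict String String,
      ((l.filterMap f).map Prod.fst).Nodup →
      (∀ p ∈ l, ∀ q, f p = some q → res.contains q.1 = false) →
      (l.foldl (fun res p => match f p with | none => res | some q => res.insert q.1 q.2) res).items
        = res.items ++ l.filterMap f := by
  induction l with
  | nil => intro res _ _; simp
  | cons p l ih =>
    intro res hnd hfresh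
    cases hfp : f p with
    | none =>
      simp only [List.foldl_cons, hfp, List.filterMap_cons]
      exact ih res (by simpa [List.filterMap_cons, hfp] using hnd)
        (fun p' hp' q hq => hfresh p' (by simp [hp']) q hq)
    | some q =>
      simp only [List.foldl_cons, hfp, List.filterMap_cons]
      have hres : res.contains q.1 = false := hfresh p (by simp) q hfp
      have hndq : (q.1 :: (l.filterMap f).map Prod.fst).Nodup := by
        simpa [List.filterMap_cons, hfp] using hnd
      rw [ih (res.insert q.1 q.2) hndq.of_cons]
      · rw [PySem.Dict.items_insert_of_not_contains _ _ hres]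
        simp
      · intro p' hp' q' hq'
        rw [PySem.Dict.contains_insert]
        have hne : q'.1 ≠ q.1 := by
          intro he
          exact (List.nodup_cons.mp hndq).1
            (he ▸ List.mem_map_of_mem (List.mem_filterMap.mpr ⟨p', hp', hq'⟩))
        simp [hne, hfresh p' (by simp [hp']) q' hq']

-- a key not among an association list's keys is not found
theorem get?_mk_of_not_mem (r : List (String × String)) (k : String)
    (h : k ∉ r.map Prod.fst) : (PySem.Dict.mk r).get? k = none := by
  simp only [PySem.Dict.get?, Option.map_eq_none_iff, List.find?_eq_none]
  intro p hp
  simp only [beq_iff_eq]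
  exact fun he => h (he ▸ List.mem_map_of_mem hp)

-- A's guarded delete is plain erase (erasing an absent key is the identity)
theorem guarded_erase (d : PySem.Dict String String) (k : String) :
    (if d.contains k then d.erase k else d) = d.erase k := by
  by_cases h : d.contains k = true
  · simp [h]
  · simp only [h, Bool.false_eq_true, if_neg, not_false_iff]
    apply PySem.Dict.ext
    simp only [PySem.Dict.erase]
    refine (List.filter_eq_self.mpr fun p hpmem => ?_).symm
    simp only [PySem.Dict.contains, List.any_eq_true, not_exists] at h
    by_contra hc
    simp only [Bool.not_eq_eq_eq_not, Bool.not_true, Bool.not_eq_false] at hc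
    exact h p ⟨hpmem, hc⟩

-- erasing a key preserves distinctness of the keys
theorem nodup_keys_erase (d : PySem.Dict String String) (k : String)
    (h : d.keys.Nodup) : (d.erase k).keys.Nodup := by
  simp only [PySem.Dict.keys, PySem.Dict.erase] at *
  exact (List.Sublist.map Prod.fst List.filter_sublist).nodup h

-- filtering key k out of an items list does not change whether some other key a occurs
theorem contains_erase_of_ne (d : PySem.Dict String String) (a k : String) (h : a ≠ k) :
    (d.erase k).contains a = d.contains a := by
  rw [Bool.eq_iff_iff]
  simp only [PySem.Dict.contains, PySem.Dict.erase, List.any_eq_true, List.mem_filter, beq_iff_eq]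
  constructor
  · rintro ⟨p, ⟨hp, -⟩, hpa⟩; exact ⟨p, hp, hpa⟩
  · rintro ⟨p, hp, hpa⟩; exact ⟨p, ⟨hp, by simp [hpa, h]⟩, hpa⟩

-- the core invariant of A's loop: its result is part1 (left joined against right) ++ part2 (fresh right keys)
theorem A_core (right : List (String × String)) :
    ∀ d : PySem.Dict String String, d.keys.Nodup → (right.map Prod.fst).Nodup →
      (right.foldl
        (fun to_ret p =>
          if p.2 == "__delete_skip" then
            (if to_ret.contains p.1 then to_ret.erase p.1 else to_ret)
          else
            to_ret.insert p.1 p.2) d).items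
        = d.items.filterMap (f1 right) ++ right.filterMap (f2 d) := by
  induction right with
  | nil =>
    intro d _ _
    have : f1 [] = some := funext fun p => rfl
    simp [this]
  | cons q r ih =>
    intro d hd hr
    obtain ⟨k0, v0⟩ := q
    simp only [List.map_cons, List.nodup_cons, List.mem_map] at hr
    obtain ⟨hk0, hrnd⟩ := hr
    have hk0r : k0 ∉ r.map Prod.fst := by
      simpa [List.mem_map] using hk0
    simp only [List.foldl_cons]
    by_cases hdel : (v0 == "__delete_skip") = true
    · rw [if_pos hdel, guarded_erase, ih (d.erase k0) (nodup_keys_erase d k0 hd) hrnd]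
      have hv0 : v0 = "__delete_skip" := by simpa using hdel
      congr 1
      · -- part1: erased items joined by f1 r = all items joined by f1 ((k0,v0)::r)
        show ((d.items.filter (fun p => !(p.1 == k0))).filterMap (f1 r)) = _
        rw [List.filterMap_filter]
        refine List.filterMap_congr fun p _ => ?_
        by_cases hpk : p.1 = k0
        · simp only [hpk, beq_self_eq_true, Bool.not_true, if_neg, Bool.false_eq_true,
            not_false_iff]
          unfold f1
          rw [PySem.Dict.get?_mk_cons]
          simp [hpk, hv0]
        · have : (p.1 == k0) = false := by simp [hpk]
          simp only [this, Bool.not_false, if_pos]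
          unfold f1
          rw [PySem.Dict.get?_mk_cons]
          simp [Ne.symm hpk]
      · -- part2: the delete marker contributes nothing, and erasing k0 changes no other key's test
        have : f2 d (k0, v0) = none := by unfold f2; simp [hv0]
        rw [List.filterMap_cons, this]
        refine List.filterMap_congr fun p hp => ?_
        unfold f2
        rw [contains_erase_of_ne d p.1 k0 (fun he => hk0 ⟨p, hp, he⟩)]
    · rw [if_neg (by simp [hdel])]
      have hIH := ih (d.insert k0 v0) (PySem.Dict.nodup_keys_insert d k0 v0 hd) hrnd
      rw [hIH]
      have hget : (PySem.Dict.mk r).get? k0 = none := get?_mk_of_not_mem r k0 hk0r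
      have hf1kv : f1 r (k0, v0) = some (k0, v0) := by unfold f1; rw [hget]
      have hpart2 : r.filterMap (f2 (d.insert k0 v0)) = r.filterMap (f2 d) := by
        refine List.filterMap_congr fun p hp => ?_
        unfold f2
        rw [PySem.Dict.contains_insert]
        have : (p.1 == k0) = false := by
          simp only [beq_eq_false_iff_ne, ne_eq]
          exact fun he => hk0 ⟨p, hp, he⟩
        rw [this, Bool.false_or]
      by_cases hc : d.contains k0 = true
      · rw [PySem.Dict.items_insert_of_contains _ _ hc, List.filterMap_map, hpart2]
        have : f2 d (k0, v0) = none := by unfold f2; simp [hc]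
        rw [List.filterMap_cons, this]
        congr 1
        refine List.filterMap_congr fun p _ => ?_
        simp only [Function.comp]
        by_cases hpk : (p.1 == k0) = true
        · have hpk' : p.1 = k0 := by simpa using hpk
          rw [if_pos hpk, hf1kv]
          unfold f1
          rw [PySem.Dict.get?_mk_cons]
          simp [hpk', hdel]
        · rw [if_neg hpk]
          unfold f1
          rw [PySem.Dict.get?_mk_cons]
          have : p.1 ≠ k0 := by simpa using hpk
          simp [Ne.symm this]
      · rw [PySem.Dict.items_insert_of_not_contains _ _ (by simpa using hc),
            List.filterMap_append, hpart2]
        simp only [List.filterMap_cons, hf1kv]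
        have hcontains : d.contains k0 = false := by simpa using hc
        simp only [PySem.Dict.contains] at hcontains
        have hpart1 : d.items.filterMap (f1 ((k0, v0) :: r)) = d.items.filterMap (f1 r) := by
          refine List.filterMap_congr fun p hp => ?_
          unfold f1
          rw [PySem.Dict.get?_mk_cons]
          have hne : p.1 ≠ k0 := by
            intro he
            rw [List.any_eq_false] at hcontains
            simpa [he] using hcontains p hp
          simp [Ne.symm hne]
        have : f2 d (k0, v0) = some (k0, v0) := by
          unfold f2; simp [hc, hdel]
        rw [this, hpart1]
        simp

-- B computes the same normal form directly
theorem B_eq (left right : List (String × String))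
    (hl : (left.map Prod.fst).Nodup) (hr : (right.map Prod.fst).Nodup) :
    merge_rule_skips_py_alt left right
      = left.filterMap (f1 right) ++ right.filterMap (f2 (PySem.Dict.mk left)) := by
  unfold merge_rule_skips_py_alt
  -- phase 1: B's left loop is the conditional-insert fold of f1
  have hstep1 : (fun (res : PySem.Dict String String) (p : String × String) =>
      if (PySem.Dict.mk right).contains p.1 then
        (if ((PySem.Dict.mk right).getD p.1 "") == "__delete_skip" then res
         else res.insert p.1 ((PySem.Dict.mk right).getD p.1 ""))
      else res.insert p.1 p.2)
      = (fun res p => match f1 right p with | none => res | some q => res.insert q.1 q.2) := by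
    funext res p
    unfold f1
    rw [PySem.Dict.contains_eq_isSome_get?, PySem.Dict.getD]
    cases hg : (PySem.Dict.mk right).get? p.1 with
    | none => simp
    | some rv =>
      simp only [Option.isSome_some, if_pos, Option.getD_some]
      by_cases hd : (rv == "__delete_skip") = true <;> simp [hd]
  -- phase 2: B's right loop is the conditional-insert fold of f2
  have hstep2 : (fun (res : PySem.Dict String String) (p : String × String) =>
      if !((PySem.Dict.mk left).contains p.1) && !(p.2 == "__delete_skip")
      then res.insert p.1 p.2 else res)
      = (fun res p => match f2 (PySem.Dict.mk left) p with
          | none => res | some q => res.insert q.1 q.2) := by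
    funext res p
    unfold f2
    split <;> rfl
  rw [hstep1, hstep2]
  have hnd1 : ((left.filterMap (f1 right)).map Prod.fst).Nodup :=
    (filterMap_fst_sublist _ (f1_key right) left).nodup hl
  have h1 := foldl_optInsert (f1 right) left PySem.Dict.empty hnd1
    (fun p _ q _ => PySem.Dict.contains_empty q.1)
  have hnd2 : ((right.filterMap (f2 (PySem.Dict.mk left))).map Prod.fst).Nodup :=
    (filterMap_fst_sublist _ (f2_key _) right).nodup hr
  have hfresh : ∀ p ∈ right, ∀ q, f2 (PySem.Dict.mk left) p = some q →
      (List.foldl (fun res p => match f1 right p with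
          | none => res | some q => res.insert q.1 q.2) PySem.Dict.empty left).contains q.1
        = false := by
    intro p hp q hq
    have hq1 : q.1 = p.1 := f2_key _ p q hq
    have hcond : ((PySem.Dict.mk left)).contains p.1 = false := by
      unfold f2 at hq
      by_contra hcc
      simp only [Bool.not_eq_false] at hcc
      simp [hcc] at hq
    -- the first phase's keys come from left's keys, which p.1 avoids
    rw [Bool.eq_false_iff]
    intro habs
    simp only [PySem.Dict.contains, List.any_eq_true, beq_iff_eq] at habs
    obtain ⟨e, he, heq⟩ := habs
    rw [h1] at he
    simp only [PySem.Dict.empty, List.nil_append] at he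
    have : e.1 ∈ (left.filterMap (f1 right)).map Prod.fst := List.mem_map_of_mem he
    have : e.1 ∈ left.map Prod.fst :=
      (filterMap_fst_sublist _ (f1_key right) left).mem this
    simp only [PySem.Dict.contains] at hcond
    rw [List.any_eq_false] at hcond
    obtain ⟨w, hw, hw1⟩ := List.mem_map.mp this
    have hbeq : (w.1 == p.1) = true := by rw [hw1, heq, hq1, beq_self_eq_true]
    exact absurd hbeq (by simpa using hcond w hw)
  rw [foldl_optInsert (f2 (PySem.Dict.mk left)) right _ hnd2 hfresh, h1]
  simp [PySem.Dict.empty]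

-- ===== VERDICT (by name: the statement is the Claim_ definition above) =====
theorem merge_rule_skips_py_spec : Claim_equal_merge_rule_skips_py := by
  intro left right _ hpre
  unfold Spec_merge_rule_skips_py merge_rule_skips_py
  rw [B_eq left right hpre.1 hpre.2]
  exact A_core right (PySem.Dict.mk left) (by simpa [PySem.Dict.keys] using hpre.1) hpre.2
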